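-- pv_equiv track=rewrite | github.com/bubo77b/knowledge-subproject | src/knowledge_pipeline/pipeline.py | _find_related_ids
-- ===== SOURCE A (Python) =====
-- def _find_related_ids(related_topics: list[str], notes: list[tuple[str, str, str]]) -> list[str]:
--     if not related_topics:
--         return []
--     topics = [item.lower().strip() for item in related_topics if item.strip()]
--     if not topics:
--         return []
--
--     matches: list[str] = []
--     for note_id, title, summary in notes:
--         combined = f"{title} {summary}".lower()
--         score = sum(1 for topic in topics if topic and topic in combined)
--         if score > 0:
--             matches.append((note_id, score))
--
--     matches.sort(key=lambda item: item[1], reverse=True)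
--     return [note_id for note_id, _ in matches[:5]]
-- ===== SOURCE B (Python) =====
-- def _find_related_ids(related_topics: list[str], notes: list[tuple[str, str, str]]) -> list[str]:
--     topics = [item.lower().strip() for item in related_topics if item.strip()]
--     if not topics:
--         return []
--
--     # counting sort: buckets[score] collects note ids in scan order
--     buckets: list[list[str]] = [[] for _ in range(len(topics) + 1)]
--     for note_id, title, summary in notes:
--         combined = f"{title} {summary}".lower()
--         score = sum(1 for topic in topics if topic and topic in combined)
--         if score > 0:
--             buckets[score].append(note_id)
--
--     result: list[str] = []
--     for score in range(len(topics), 0, -1):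
--         result.extend(buckets[score])
--     return result[:5]
-- ===== Notes on version B (the rewrite author's own statement) =====
-- stated objective: alternative
-- what changed: Replaces the comparison sort of (id, score) pairs by a counting/bucket pass: matching ids are appended to buckets[score] during the single scan and emitted from the highest score down, which reproduces the stable descending order without sorting.
import Mathlib
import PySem

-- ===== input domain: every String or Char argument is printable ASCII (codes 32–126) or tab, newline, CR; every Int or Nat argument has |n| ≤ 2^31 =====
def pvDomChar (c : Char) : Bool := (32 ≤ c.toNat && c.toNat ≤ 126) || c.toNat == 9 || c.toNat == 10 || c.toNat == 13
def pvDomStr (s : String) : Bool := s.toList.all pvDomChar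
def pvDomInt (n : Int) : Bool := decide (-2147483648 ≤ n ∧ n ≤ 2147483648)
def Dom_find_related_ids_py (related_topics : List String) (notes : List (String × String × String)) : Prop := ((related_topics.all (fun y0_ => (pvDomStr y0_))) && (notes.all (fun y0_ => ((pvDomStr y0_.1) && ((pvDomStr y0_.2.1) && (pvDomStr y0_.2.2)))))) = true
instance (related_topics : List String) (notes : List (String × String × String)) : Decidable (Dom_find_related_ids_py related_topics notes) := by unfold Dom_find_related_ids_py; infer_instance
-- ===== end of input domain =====

-- B replaces A's stable comparison sort of (id, score) pairs by a bucket (counting-sort)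
-- pass over the scores — an alternative algorithm, proved to return the same list.


-- lines that appear verbatim in BOTH Pythons (A and B), transliterated once:
-- topics = [item.lower().strip() for item in related_topics if item.strip()]
def pvTopics (related_topics : List String) : List (List Char) :=
  (related_topics.filter (fun item => !(PySem.Chars.strip item.toList).isEmpty)).map
    (fun item => PySem.Chars.strip (PySem.Chars.lower item.toList))

-- combined = f"{title} {summary}".lower()
def pvCombined (title summary : String) : List Char :=
  PySem.Chars.lower (title.toList ++ ' ' :: summary.toList)

-- score = sum(1 for topic in topics if topic and topic in combined)
def pvScore (topics : List (List Char)) (combined : List Char) : Int :=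
  ((topics.filter (fun topic => !topic.isEmpty && PySem.Chars.isIn topic combined)).map
    (fun _ => (1 : Int))).sum

-- ===== PORT A =====
def find_related_ids_py (related_topics : List String) (notes : List (String × String × String)) : List String :=
  if related_topics = [] then []
  else
    let topics := pvTopics related_topics
    if topics = [] then []
    else
      let matched : List (String × Int) :=
        notes.foldl (fun acc nt =>
          let score := pvScore topics (pvCombined nt.2.1 nt.2.2)
          if score > 0 then acc ++ [(nt.1, score)] else acc) []
      let sortedm := PySem.List.sorted matched (fun p => p.2) true
      (PySem.List.slice sortedm none (some 5)).map (fun p => p.1)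

-- ===== PORT B =====
def find_related_ids_py_alt (related_topics : List String) (notes : List (String × String × String)) : List String :=
  let topics := pvTopics related_topics
  if topics = [] then []
  else
    -- buckets = [[] for _ in range(len(topics) + 1)]
    let buckets0 : List (List String) := (List.range (topics.length + 1)).map (fun _ => [])
    let buckets :=
      notes.foldl (fun bk nt =>
        let score := pvScore topics (pvCombined nt.2.1 nt.2.2)
        -- buckets[score].append(note_id); here 1 ≤ score ≤ len(topics), so the Nat index is exact
        if score > 0 then bk.set score.toNat (bk.getD score.toNat [] ++ [nt.1]) else bk) buckets0
    -- for score in range(len(topics), 0, -1): result.extend(buckets[score])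
    let result :=
      (PySem.List.pyRange (topics.length : Int) 0 (-1)).foldl
        (fun acc s => acc ++ buckets.getD s.toNat []) []
    PySem.List.slice result none (some 5)

-- ===== PRECONDITION & SPEC =====
def Spec_find_related_ids_py (related_topics : List String) (notes : List (String × String × String)) (out : List String) : Prop := out = find_related_ids_py_alt related_topics notes
instance (related_topics : List String) (notes : List (String × String × String)) (out : List String) : Decidable (Spec_find_related_ids_py related_topics notes out) := by unfold Spec_find_related_ids_py; infer_instance

-- ===== CLAIM (what is proved, stated in full; the proofs are below) =====
def Claim_equal_find_related_ids_py : Prop := ∀ (related_topics : List String) (notes : List (String × String × String)), Dom_find_related_ids_py related_topics notes → Spec_find_related_ids_py related_topics notes (find_related_ids_py related_topics notes)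

-- ===== LEMMAS AND PROOFS =====

-- the descending score list range(T, 0, -1) = [T, T-1, …, 1]
def descL (T : Nat) : List Int := List.map (fun k : Nat => ((T : Int) - (k : Int))) (List.range T)

lemma pyRange_desc (T : Nat) : PySem.List.pyRange (T : Int) 0 (-1) = descL T := by
  unfold PySem.List.pyRange descL
  norm_num
  by_cases h : T = 0
  · subst h; simp
  · rw [if_pos (by exact_mod_cast Nat.pos_of_ne_zero h)]
    apply List.map_congr_left
    intro k _
    ring

lemma mem_desc {T : Nat} {s : Int} : s ∈ descL T ↔ 1 ≤ s ∧ s ≤ T := by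
  unfold descL
  rw [List.mem_map]
  constructor
  · rintro ⟨k, hk, rfl⟩
    rw [List.mem_range] at hk
    omega
  · rintro ⟨h1, h2⟩
    exact ⟨(T - s).toNat, List.mem_range.mpr (by omega), by omega⟩

lemma desc_pairwise (T : Nat) : (descL T).Pairwise (· > ·) := by
  unfold descL
  refine List.Pairwise.map _ ?_ List.pairwise_lt_range
  intro a b hab
  simp only [gt_iff_lt]
  omega

-- insertBy passes over a block none of whose elements it is inserted before
lemma insertBy_append_skip {α : Type} (before : α → α → Bool) (x : α) (l r : List α)
    (h : ∀ y ∈ l, before x y = false) :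
    PySem.List.insertBy before x (l ++ r) = l ++ PySem.List.insertBy before x r := by
  induction l with
  | nil => rfl
  | cons y ys ih =>
    simp only [List.cons_append, PySem.List.insertBy]
    rw [h y (by simp)]
    simp only [Bool.false_eq_true, if_false, List.cons.injEq, true_and]
    exact ih (fun z hz => h z (by simp [hz]))

-- inserting x into the bucket concatenation appends it to the end of its own bucket
lemma insertBucket (S : List Int) (hS : S.Pairwise (· > ·)) (x : String × Int)
    (hx : x.2 ∈ S) (ms : List (String × Int)) :
    PySem.List.insertBy (fun a b => decide (b.2 < a.2)) x
        (S.flatMap (fun s => ms.filter (fun p => p.2 == s)))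
      = S.flatMap (fun s => (ms ++ [x]).filter (fun p => p.2 == s)) := by
  induction S with
  | nil => cases hx
  | cons s S' ih =>
    have hgt : ∀ t ∈ S', t < s := fun t ht => (List.pairwise_cons.mp hS).1 t ht
    have hS' : S'.Pairwise (· > ·) := (List.pairwise_cons.mp hS).2
    by_cases hxs : x.2 = s
    · have hxnotS' : x.2 ∉ S' := fun h => absurd (hgt _ h) (by omega)
      have hfilt : ∀ s' ∈ S', (ms ++ [x]).filter (fun p => p.2 == s') = ms.filter (fun p => p.2 == s') := by
        intro s' hs'
        rw [List.filter_append]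
        have hne : (x.2 == s') = false := by
          simp only [beq_eq_false_iff_ne, ne_eq]
          intro h; exact hxnotS' (h ▸ hs')
        simp [hne]
      have hrest : ∀ y ∈ S'.flatMap (fun s' => ms.filter (fun p => p.2 == s')), y.2 < s := by
        intro y hy
        rcases List.mem_flatMap.mp hy with ⟨s', hs', hy'⟩
        have h2 : (fun (p : String × Int) => p.2 == s') y = true := (List.mem_filter.mp hy').2
        have := beq_iff_eq.mp h2
        have := hgt s' hs'
        omega
      have hskip : ∀ y ∈ ms.filter (fun p => p.2 == s), (fun a b => decide ((b : String × Int).2 < a.2)) x y = false := by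
        intro y hy
        have h2 : (fun (p : String × Int) => p.2 == s) y = true := (List.mem_filter.mp hy).2
        have := beq_iff_eq.mp h2
        simp only [decide_eq_false_iff_not]
        omega
      rw [List.flatMap_cons, insertBy_append_skip _ _ _ _ hskip]
      rw [List.flatMap_cons]
      have hbx : (ms ++ [x]).filter (fun p => p.2 == s) = ms.filter (fun p => p.2 == s) ++ [x] := by
        rw [List.filter_append]
        have heq : (x.2 == s) = true := beq_iff_eq.mpr hxs
        simp [heq]
      rw [hbx]
      have hflatrw : S'.flatMap (fun s' => (ms ++ [x]).filter (fun p => p.2 == s'))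
          = S'.flatMap (fun s' => ms.filter (fun p => p.2 == s')) := List.flatMap_congr hfilt
      rw [hflatrw]
      cases hrS : S'.flatMap (fun s' => ms.filter (fun p => p.2 == s')) with
      | nil => simp [PySem.List.insertBy]
      | cons z zs =>
        have hz : z.2 < s := hrest z (by rw [hrS]; simp)
        have hb : (decide (z.2 < x.2)) = true := by simp only [decide_eq_true_eq]; omega
        simp only [PySem.List.insertBy, hb, if_pos]
        simp
    · have hxS' : x.2 ∈ S' := by
        rcases List.mem_cons.mp hx with h | h
        · exact absurd h hxs
        · exact h
      have hskip : ∀ y ∈ ms.filter (fun p => p.2 == s), (fun a b => decide ((b : String × Int).2 < a.2)) x y = false := by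
        intro y hy
        have h2 : (fun (p : String × Int) => p.2 == s) y = true := (List.mem_filter.mp hy).2
        have hy2 := beq_iff_eq.mp h2
        have hxlt : x.2 < s := hgt _ hxS'
        simp only [decide_eq_false_iff_not]
        omega
      rw [List.flatMap_cons, insertBy_append_skip _ _ _ _ hskip, ih hS' hxS']
      rw [List.flatMap_cons]
      have hxe : (ms ++ [x]).filter (fun p => p.2 == s) = ms.filter (fun p => p.2 == s) := by
        rw [List.filter_append]
        have hne : (x.2 == s) = false := by simp only [beq_eq_false_iff_ne, ne_eq]; exact hxs
        simp [hne]
      rw [hxe]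

-- Python's stable descending sort = concatenation of the score buckets, highest score first
lemma sorted_eq_buckets (T : Nat) (ms : List (String × Int))
    (hb : ∀ p ∈ ms, 1 ≤ p.2 ∧ p.2 ≤ T) :
    PySem.List.sorted ms (fun p => p.2) true
      = (descL T).flatMap (fun s => ms.filter (fun p => p.2 == s)) := by
  induction ms using List.reverseRecOn with
  | nil => simp [PySem.List.sorted]
  | append_singleton ms x ih =>
    rw [PySem.List.sorted_rev_eq_foldl_insertBy] at ih ⊢
    rw [List.foldl_append, List.foldl_cons, List.foldl_nil]
    rw [ih (fun p hp => hb p (by simp [hp]))]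
    have hx := hb x (by simp)
    exact insertBucket _ (desc_pairwise T) x (mem_desc.mpr hx) ms

-- the loop bodies of the two ports, as named step functions
def pvStepA (topics : List (List Char)) (acc : List (String × Int)) (nt : String × String × String) : List (String × Int) :=
  let score := pvScore topics (pvCombined nt.2.1 nt.2.2)
  if score > 0 then acc ++ [(nt.1, score)] else acc

def pvStepB (topics : List (List Char)) (bk : List (List String)) (nt : String × String × String) : List (List String) :=
  let score := pvScore topics (pvCombined nt.2.1 nt.2.2)
  if score > 0 then bk.set score.toNat (bk.getD score.toNat [] ++ [nt.1]) else bk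

lemma score_le (topics : List (List Char)) (combined : List Char) :
    pvScore topics combined ≤ topics.length := by
  unfold pvScore
  rw [PySem.List.sum_map_const_int]
  have := List.length_filter_le (fun topic => !topic.isEmpty && PySem.Chars.isIn topic combined) topics
  simp only [mul_one]
  exact_mod_cast this

-- simultaneous invariant of A's match list and B's buckets under the note scan
lemma fold_rel (topics : List (List Char)) (notes : List (String × String × String))
    (ms : List (String × Int)) (bk : List (List String))
    (hlen : bk.length = topics.length + 1)
    (hbnd : ∀ p ∈ ms, 1 ≤ p.2 ∧ p.2 ≤ topics.length)
    (hinv : ∀ s : Nat, bk.getD s [] = (ms.filter (fun p => p.2 == (s : Int))).map Prod.fst) :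
    (notes.foldl (pvStepB topics) bk).length = topics.length + 1
    ∧ (∀ p ∈ notes.foldl (pvStepA topics) ms, 1 ≤ p.2 ∧ p.2 ≤ topics.length)
    ∧ ∀ s : Nat, (notes.foldl (pvStepB topics) bk).getD s []
        = ((notes.foldl (pvStepA topics) ms).filter (fun p => p.2 == (s : Int))).map Prod.fst := by
  induction notes generalizing ms bk with
  | nil => exact ⟨hlen, hbnd, hinv⟩
  | cons nt notes ih =>
    simp only [List.foldl_cons]
    by_cases hpos : pvScore topics (pvCombined nt.2.1 nt.2.2) > 0
    · set sc := pvScore topics (pvCombined nt.2.1 nt.2.2) with hsc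
      have hle : sc ≤ topics.length := score_le topics _
      have hstA : pvStepA topics ms nt = ms ++ [(nt.1, sc)] := by
        unfold pvStepA; rw [← hsc]; simp [hpos]
      have hstB : pvStepB topics bk nt = bk.set sc.toNat (bk.getD sc.toNat [] ++ [nt.1]) := by
        unfold pvStepB; rw [← hsc]; simp [hpos]
      rw [hstA, hstB]
      apply ih
      · simp [hlen]
      · intro p hp
        rcases List.mem_append.mp hp with h | h
        · exact hbnd p h
        · simp only [List.mem_singleton] at h
          subst h
          exact ⟨by omega, hle⟩
      · intro s
        by_cases hs : s = sc.toNat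
        · subst hs
          have hslt : sc.toNat < bk.length := by rw [hlen]; omega
          rw [List.getD_eq_getElem?_getD, List.getElem?_set_self (by simpa using hslt), Option.getD_some]
          rw [List.filter_append, hinv sc.toNat]
          have heq : ((nt.1, sc).2 == ((sc.toNat : Nat) : Int)) = true := by
            simp only [beq_iff_eq]; omega
          simp only [List.filter_cons, heq, List.filter_nil, List.map_append, List.map_cons,
            List.map_nil, if_true]
        · rw [List.getD_eq_getElem?_getD, List.getElem?_set_ne (by omega)]
          rw [← List.getD_eq_getElem?_getD, hinv s]
          rw [List.filter_append]
          have hne : ((nt.1, sc).2 == ((s : Nat) : Int)) = false := by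
            simp only [beq_eq_false_iff_ne, ne_eq]
            intro h; apply hs; omega
          simp only [List.filter_cons, hne, List.filter_nil, List.append_nil,
            Bool.false_eq_true, if_false]
    · have hstA : pvStepA topics ms nt = ms := by unfold pvStepA; simp [hpos]
      have hstB : pvStepB topics bk nt = bk := by unfold pvStepB; simp [hpos]
      rw [hstA, hstB]
      exact ih ms bk hlen hbnd hinv

-- ===== VERDICT (by name: the statement is the Claim_ definition above) =====
theorem find_related_ids_py_spec : Claim_equal_find_related_ids_py := by
  intro related_topics notes _
  unfold Spec_find_related_ids_py find_related_ids_py find_related_ids_py_alt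
  by_cases hrt : related_topics = []
  · subst hrt
    simp [pvTopics]
  · rw [if_neg hrt]
    by_cases htop : pvTopics related_topics = []
    · simp [htop]
    · rw [if_neg htop, if_neg htop]
      set topics := pvTopics related_topics with htopics
      set T := topics.length with hT
      show (PySem.List.slice (PySem.List.sorted (notes.foldl (pvStepA topics) []) (fun p => p.2) true)
              none (some 5)).map (fun p => p.1)
          = PySem.List.slice ((PySem.List.pyRange (T : Int) 0 (-1)).foldl
              (fun acc s => acc ++ (notes.foldl (pvStepB topics)
                ((List.range (T + 1)).map (fun _ => []))).getD s.toNat []) []) none (some 5)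
      obtain ⟨hlen, hbnd, hinv⟩ := fold_rel topics notes []
        ((List.range (T + 1)).map (fun _ => []))
        (by simp [hT]) (by simp) (fun s => by simp)
      set msf := notes.foldl (pvStepA topics) [] with hmsf
      set bkf := notes.foldl (pvStepB topics) ((List.range (T + 1)).map (fun _ => [])) with hbkf
      rw [pyRange_desc T]
      have hcong : (descL T).foldl (fun acc s => acc ++ bkf.getD s.toNat []) []
          = (descL T).foldl (fun acc s => acc ++ (msf.filter (fun p => p.2 == s)).map Prod.fst) [] := by
        apply PySem.List.foldl_congr_mem
        intro acc s hs
        have hsb := mem_desc.mp hs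
        have hcast : ((s.toNat : Nat) : Int) = s := by omega
        rw [hinv s.toNat, hcast]
      rw [hcong, PySem.List.foldl_append_eq_flatMap]
      have hmapflat : (descL T).flatMap (fun s => (msf.filter (fun p => p.2 == s)).map Prod.fst)
          = ((descL T).flatMap (fun s => msf.filter (fun p => p.2 == s))).map Prod.fst := by
        rw [List.map_flatMap]
      rw [List.nil_append, hmapflat, ← sorted_eq_buckets T msf hbnd]
      rw [PySem.List.slice_to _ (by norm_num), PySem.List.slice_to _ (by norm_num)]
      rw [List.map_take]
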